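/- GENERATED by mk_final_copies.py from the proof of the farm's unit `start_decoder.R9` (farm:start_decoder.R9.2: Lemmas.lean) as the
   re-elaboration sweep compiled it — do not edit. -/
/-
  start_decoder.R9 — the memory-level carrier `Pt` of the mapping loop's invariant between the call returns of the segment,
  and the ONE frame lemma `Pt.carry` that takes it over a callee's footprint, an allocation, or the segment's own stores into
  the mapping record under construction.

      Allowed, Geo, Pt.geo          where a store may go; the geometry (frame, `*f`, arena, record, `log2_4`) as numbers
      Pt, Pt.of_body / .frame / .loop   `Frame` + `MapLoop` without the registers, `i < mapping_count`, the record address `m`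
      mid_carry                     `Mid.frame` and `Mid.grow` in one step (for `setup_malloc`)
      Pt.carry                      THE frame lemma; instances: `carry_own`, `write` (own stores), `carry_f` (get_bits, error),
                                    `after_get_bits`, `after_error`, `after_malloc`, `after_malloc_fail`
      Pt.readerPre / errorPre / arenaPre / site_rec / failed     the callees' preconditions, the check sites, the error exit
      St, AtS                       the assertion at a call return inside the segment (what the legs of Proof.lean hand over)
      RecEq, store_submaps, store_steps, nchan_write             the record's fields over the segment's stores
-/
import Vorbis.Spec.StartDecoderB
import Vorbis.Spec.StartDecoderBTest
import Vorbis.Spec.Reader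

open X86 X86.User Asan Vorbis Vorbis.Spec Vorbis.Spec.StartDecoder

namespace Vorbis.Spec.start_decoder_R9

/-- **Where a store of the segment (or of one of its callees) may go**: the stack below the steady frame's slots; the windows of
`*f` that neither `Mid g 7 8 8` nor `MapTrans` reads; the arena's shadow; the mapping record under construction (`m`). -/
def Allowed (g : Ghost) (A : Arena) (m : Nat) (w : Span) : Prop :=
  (g.RA - 1888 ≤ w.lo ∧ w.hi ≤ g.R + 8) ∨
  (g.f + 8 ≤ w.lo ∧ w.hi ≤ g.f + 24) ∨
  (g.f + 48 ≤ w.lo ∧ w.hi ≤ g.f + 152) ∨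
  (g.f + 1480 ≤ w.lo ∧ w.hi ≤ g.f + 1749) ∨
  (g.f + 1750 ≤ w.lo ∧ w.hi ≤ g.f + 1784) ∨
  ((shadowSpan A.B (A.B + A.L)).lo ≤ w.lo ∧ w.hi ≤ (shadowSpan A.B (A.B + A.L)).hi) ∨
  (m ≤ w.lo ∧ w.hi ≤ m + 56)

/-- **The mapping loop's invariant as a predicate of the memory alone** (`Frame` and `MapLoop` without the registers), with
`i < mapping_count`: what every cut point of segment R9 carries. -/
structure Pt (u₀ : State) (g : Ghost) (i : Nat) (A7 A7c Ai : Arena) (A : Arena × List Obj) (m : Nat) (mem : Mem) : Prop where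
  entry : AtEntry (conv u₀) L.start_decoder.entry depth g.ret g.e
  shadowIdx : mem.u64 (g.R + 8) = (g.R + 0x50) / 8
  saved_rbx : mem.u64 (g.R + 0x598) = (g.e.reg .rbx).toNat
  saved_rbp : mem.u64 (g.R + 0x5a0) = (g.e.reg .rbp).toNat
  saved_r12 : mem.u64 (g.R + 0x5a8) = (g.e.reg .r12).toNat
  saved_r13 : mem.u64 (g.R + 0x5b0) = (g.e.reg .r13).toNat
  saved_r14 : mem.u64 (g.R + 0x5b8) = (g.e.reg .r14).toNat
  saved_r15 : mem.u64 (g.R + 0x5c0) = (g.e.reg .r15).toNat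
  saved_ra : mem.u64 (g.R + 0x5c8) = g.ret.toNat
  code : CodeOK u₀ mem
  shadow : ShadowInv A.2 g.frames' g.R mem
  offText : ∀ o, o ∈ A.2 → L.textHi ≤ o.base
  ext : g.A0.1.Extends A.1
  callers : ∀ bF, bF ∈ g.frames → g.RA + 8 ≤ bF.1
  sh7 : Log2_4In mem
  same : Mem.SameExcept (footprint g) g.e.mem mem
  hand : g.Hand A
  mid : Mid g 7 8 8 A7 A mem
  cnt : StartDecoder.slot g mem 0x10 = i
  lt : (i : Int) < stb_vorbis.mapping_count mem g.f
  maps : MapTrans A7 A7c Ai A.1 mem g.f i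
  /-- `m` is the mapping record under construction, `mapping + 56·i` -/
  recAt : mapAt g mem i = m

/-- The entry assertion of the segment gives the carrier. -/
theorem Pt.of_body {u₀ : State} {g : Ghost} {i : Nat} {A7 A7c : Arena} {A : Arena × List Obj} {v : State}
    (h : BodyR9 u₀ g i A7 A7c A v) : Pt u₀ g i A7 A7c A.1 A (mapAt g v.mem i) v.mem :=
  { entry := h.loop.frame.entry
    shadowIdx := h.loop.frame.shadowIdx
    saved_rbx := h.loop.frame.saved_rbx
    saved_rbp := h.loop.frame.saved_rbp
    saved_r12 := h.loop.frame.saved_r12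
    saved_r13 := h.loop.frame.saved_r13
    saved_r14 := h.loop.frame.saved_r14
    saved_r15 := h.loop.frame.saved_r15
    saved_ra := h.loop.frame.saved_ra
    code := h.loop.frame.code
    shadow := h.loop.frame.shadow
    offText := h.loop.frame.offText
    ext := h.loop.frame.ext
    callers := h.loop.frame.callers
    sh7 := h.loop.frame.sh7
    same := h.loop.frame.same
    hand := h.loop.hand
    mid := h.loop.mid
    cnt := h.loop.cnt
    lt := h.lt
    maps := h.loop.maps
    recAt := rfl }

/-- The carrier and the registers give `Frame` at a cut point. -/
theorem Pt.frame {u₀ : State} {g : Ghost} {i : Nat} {A7 A7c Ai : Arena} {A : Arena × List Obj} {m : Nat} {v : State} (pc : Word)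
    (h : Pt u₀ g i A7 A7c Ai A m v.mem) (hrip : v.rip = pc) (hrsp : v.reg .rsp = addr g.R) (hinv : abiInv v) :
    Frame u₀ g pc A v :=
  { entry := h.entry
    rip := hrip
    rsp := hrsp
    shadowIdx := h.shadowIdx
    saved_rbx := h.saved_rbx
    saved_rbp := h.saved_rbp
    saved_r12 := h.saved_r12
    saved_r13 := h.saved_r13
    saved_r14 := h.saved_r14
    saved_r15 := h.saved_r15
    saved_ra := h.saved_ra
    code := h.code
    inv := hinv
    shadow := h.shadow
    offText := h.offText
    ext := h.ext
    callers := h.callers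
    sh7 := h.sh7
    same := h.same }

/-- The carrier and the registers give the mapping loop's invariant at a cut point. -/
theorem Pt.loop {u₀ : State} {g : Ghost} {i : Nat} {A7 A7c Ai : Arena} {A : Arena × List Obj} {m : Nat} {v : State} (pc : Word)
    (h : Pt u₀ g i A7 A7c Ai A m v.mem) (hrip : v.rip = pc) (hrsp : v.reg .rsp = addr g.R) (hinv : abiInv v)
    (hrbp : v.reg .rbp = addr g.f) : MapLoop u₀ g pc i A7 A7c Ai A v :=
  { frame := h.frame pc hrip hrsp hinv
    hand := h.hand
    mid := h.mid
    rbp := hrbp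
    cnt := h.cnt
    i_le := Int.le_of_lt h.lt
    maps := h.maps }

/-- The numbers of the frame: `R + 1480 = RA`, the function's stack inside `[700000H, 800000H)`. -/
theorem Pt.nums {u₀ : State} {g : Ghost} {i : Nat} {A7 A7c Ai : Arena} {A : Arena × List Obj} {m : Nat} {mem : Mem}
    (h : Pt u₀ g i A7 A7c Ai A m mem) :
    g.R + 1480 = g.RA ∧ g.R % 8 = 0 ∧ 0x700000 + 1888 ≤ g.RA ∧ g.RA + 8 ≤ 0x800000 := by
  have h1 : g.RA % 8 = 0 := h.entry.align
  have h2 : 0x700000 + depth ≤ g.RA := h.entry.room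
  have h3 : g.RA + 8 ≤ 0x800000 := h.entry.top
  unfold Ghost.R
  simp only [depth, steady] at h2 ⊢
  omega

/-- **Where `*f` is**: above the function's return-address slot (a stack object of a caller) or off the stack region; above
the image's text, inside the data space. -/
theorem Pt.where_f {u₀ : State} {g : Ghost} {i : Nat} {A7 A7c Ai : Arena} {A : Arena × List Obj} {m : Nat} {mem : Mem}
    (h : Pt u₀ g i A7 A7c Ai A m mem) :
    0x119d40 ≤ g.f ∧ g.f + 1808 ≤ 0xC00000 ∧ (g.RA + 8 ≤ g.f ∨ g.f + 1808 ≤ 0x700000 ∨ 0x800000 ≤ g.f) := by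
  have hobj' : LiveIn A.2 g.frames' g.f Off.sizeof.stb_vorbis := h.hand.obj.mono (frames'_sub g A.2)
  have hw := hobj'.where_ h.shadow h.offText (by decide)
  simp only [Off.sizeof.stb_vorbis] at hw
  refine ⟨hw.1, hw.2.1, ?_⟩
  obtain ⟨o, ho, k1, k2⟩ := h.hand.obj
  simp only [Off.sizeof.stb_vorbis] at k2
  rcases List.mem_append.mp ho with hs | hoth
  · unfold stackObjs at hs
    obtain ⟨bF, hbF, hin⟩ := List.mem_flatMap.mp hs
    have hbF' : bF ∈ g.frames' := List.mem_cons_of_mem _ hbF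
    obtain ⟨a1, a8, _, _, _⟩ := h.shadow.stack.active bF hbF'
    have hg := FrameLayout.objsAt_gran a1 a8 hin
    have hc := h.callers bF hbF
    have e : o.gLo = o.base / 8 := rfl
    left
    omega
  · have := h.shadow.off o hoth
    unfold OffStack at this
    omega


/-- **The geometry every frame argument of the segment needs, as numbers**: the frame, `*f`, the arena's buffer, the mapping
record under construction `m = mapping + 56·i` inside the arena, the global `log2_4` off `*f` and off the arena. -/
structure Geo (g : Ghost) (A : Arena) (m : Nat) : Prop where
  r1 : g.R + 1480 = g.RA
  r2 : 0x700000 + 1888 ≤ g.RA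
  r3 : g.RA + 8 ≤ 0x800000
  f1 : 0x119d40 ≤ g.f
  f2 : g.f + 1808 ≤ 0xC00000
  f3 : g.RA + 8 ≤ g.f ∨ g.f + 1808 ≤ 0x700000 ∨ 0x800000 ≤ g.f
  f4 : g.f + 1808 ≤ 0x120640 ∨ 0x120650 ≤ g.f
  a1 : 0x119d40 ≤ A.B
  a2 : A.B + A.L ≤ 0xC00000
  a3 : A.B + A.L ≤ 0x700000 ∨ 0x800000 ≤ A.B
  a4 : g.f + 1808 ≤ A.B ∨ A.B + A.L ≤ g.f
  a5 : A.B + A.L ≤ 0x120640 ∨ 0x120650 ≤ A.B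
  m1 : A.B ≤ m
  m2 : m + 56 ≤ A.B + A.L

/-- The mapping table is a block of the current arena. -/
theorem Pt.table_blk {u₀ : State} {g : Ghost} {i : Nat} {A7 A7c Ai : Arena} {A : Arena × List Obj} {m : Nat} {mem : Mem}
    (h : Pt u₀ g i A7 A7c Ai A m mem) :
    A.1.Blk ⟨stb_vorbis.mapping mem g.f, Off.sizeof.Mapping * (stb_vorbis.mapping_count mem g.f).toNat⟩ :=
  ((h.maps.MP1_block.1.mono h.maps.ext7c).mono h.maps.exti)

/-- The geometry at a point of the segment. -/
theorem Pt.geo {u₀ : State} {g : Ghost} {i : Nat} {A7 A7c Ai : Arena} {A : Arena × List Obj} {m : Nat} {mem : Mem}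
    (h : Pt u₀ g i A7 A7c Ai A m mem) : Geo g A.1 m := by
  obtain ⟨n1, _, n3, n4⟩ := h.nums
  obtain ⟨w1, w2, w3⟩ := h.where_f
  have ha := h.mid.arena
  have hb := ha.bounds
  have h1x := ha.AR1x
  have hout := h.hand.objOut
  have htext : L.textHi ≤ A.1.B := h.hand.arenaText
  have e : L.textHi = 0x119d40 := rfl
  simp only [Off.sizeof.stb_vorbis] at hout
  -- `log2_4` is a fixed object: outside the arena, and another block than `*f`
  have hlog : (⟨0x120640, 16⟩ : Block) ∈ fixedBlocks g.len := by
    simp only [fixedBlocks, globalBlocks, List.mem_cons, List.mem_nil_iff, or_false]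
    right
    right
    right
    right
    left
    trivial
  have hlo := h.hand.outside _ hlog
  simp only [] at hlo
  have hf4 : g.f + 1808 ≤ 0x120640 ∨ 0x120650 ≤ g.f := by
    have hB1 : g.Blk A (objBlock g.f) := runBlk_extra List.mem_cons_self
    have hB2 : g.Blk A ⟨0x120640, 16⟩ := runBlk_extra (List.mem_cons_of_mem _ hlog)
    rcases h.mid.env.ok.apart _ _ hB1 hB2 with heq | hd
    · simp only [objBlock, Off.sizeof.stb_vorbis, Block.mk.injEq] at heq
      omega
    · simp only [vblock, Off.sizeof.stb_vorbis] at hd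
      omega
  -- the record lies inside the mapping table, a block of the arena
  have hin := arena_inside ha h.table_blk
  simp only [Off.sizeof.Mapping] at hin
  have hlt := h.lt
  have hm : m = stb_vorbis.mapping mem g.f + 56 * i := by
    rw [← h.recAt]
    simp only [mapAt, stb_vorbis.mapping_at, Off.sizeof.Mapping]
  refine ⟨n1, n3, n4, w1, w2, w3, hf4, by omega, hb.2.2.2, h1x.2, hout, ?_, ?_, ?_⟩
  · omega
  · rw [hm]
    omega
  · rw [hm]
    omega


/-- **`Mid.frame` and `Mid.grow` in one step** (the proof is `Mid.frame`'s, with the environment of the new arena / memory given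
instead of derived from an unchanged shadow): what `setup_malloc` needs, whose post speaks of the new arena AND the new memory. -/
theorem mid_carry {g : Ghost} {k kc z : Nat} {Ac : Arena} {A A' : Arena × List Obj} {mem mem' : Mem} (h : Mid g k kc z Ac A mem)
    (he : ObjEq (Mid.winsAt k z) mem g.f mem' g.f) (hk : ∀ B, Ac.Blk B → B.Kept mem mem')
    (hconsts : SDFrameConsts kc mem' g.R) (hslot : 6 ≤ k → k ≤ 9 → mem'.i32 (g.R + 0x28) = mem.i32 (g.R + 0x28))
    (hext : A.1.Extends A'.1) (henv : Env (g.Blk A') (g.Live A') mem') (harena : ArenaOK A'.1 A'.2 mem' g.f)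
    (hno : A'.1.temps = []) (hbits : Bits (g.Blk A') g.len mem' g.f) : Mid g k kc z Ac A' mem' := by
  have hge := Mid.hi_ge k
  have m0 : ((0, 8) : Nat × Nat) ∈ Mid.winsAt k z := List.mem_cons_self
  have m1 : ((24, 48) : Nat × Nat) ∈ Mid.winsAt k z := List.mem_cons_of_mem _ List.mem_cons_self
  have m2 : ((152, Mid.hi k) : Nat × Nat) ∈ Mid.winsAt k z :=
    List.mem_cons_of_mem _ (List.mem_cons_of_mem _ List.mem_cons_self)
  have m3 : ((restFrom z, 1480) : Nat × Nat) ∈ Mid.winsAt k z :=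
    List.mem_cons_of_mem _ (List.mem_cons_of_mem _ (List.mem_cons_of_mem _ List.mem_cons_self))
  have m4 : ((1749, 1750) : Nat × Nat) ∈ Mid.winsAt k z :=
    List.mem_cons_of_mem _ (List.mem_cons_of_mem _ (List.mem_cons_of_mem _ (List.mem_cons_of_mem _ List.mem_cons_self)))
  have m5 : ((1784, 1788) : Nat × Nat) ∈ Mid.winsAt k z :=
    List.mem_cons_of_mem _ (List.mem_cons_of_mem _ (List.mem_cons_of_mem _ (List.mem_cons_of_mem _
      (List.mem_cons_of_mem _ List.mem_cons_self))))
  have hkc : ∀ B, Ac.Blk B → B.Kept mem mem' := hk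
  have heown : ObjEq (Own.winsAt k) mem g.f mem' g.f := by
    apply he.sub
    intro w hw
    simp only [Own.winsAt, List.mem_cons, List.mem_nil_iff, or_false] at hw
    rcases hw with rfl | rfl | rfl
    · exact ⟨(0, 8), m0, by simp only []; omega, by simp only []; omega⟩
    · exact ⟨(24, 48), m1, Nat.le_refl _, Nat.le_refl _⟩
    · exact ⟨(152, Mid.hi k), m2, by simp only []; omega, Nat.le_refl _⟩
  have hown := h.own.frame heown hkc
  refine ⟨henv, ?_, harena, hno, h.extc.trans hext, hbits, ?_, ?_, ?_, hown, ?_, ?_, ?_⟩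
  · exact hconsts
  · have e : stb_vorbis.first_decode mem' g.f = stb_vorbis.first_decode mem g.f := by
      simp only [vacc, voff]
      exact he.u8 1749 ⟨(1749, 1750), m4, Nat.le_refl _, Nat.le_refl _⟩
    rw [e]
    exact h.first
  · have e : stb_vorbis.discard_samples_deferred mem' g.f = stb_vorbis.discard_samples_deferred mem g.f := by
      simp only [vacc, voff]
      exact he.i32 1784 ⟨(1784, 1788), m5, Nat.le_refl _, Nat.le_refl _⟩
    rw [e]
    exact h.discard0
  · apply h.header.transfer
    apply he.sub
    intro w hw
    simp only [HeaderOK.wins, List.mem_cons, List.mem_nil_iff, or_false] at hw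
    rcases hw with rfl | rfl
    · exact ⟨(0, 8), m0, Nat.le_refl _, Nat.le_refl _⟩
    · exact ⟨(152, Mid.hi k), m2, Nat.le_refl _, by simp only []; omega⟩
  · -- the slot of longest_floorlist and `values` of every floor
    intro h6 h9
    obtain ⟨h1, h2, h3⟩ := h.lfl h6 h9
    have hb6 := Mid.hi_ge6 h6
    have hfl := h.own.floor h6
    have eslot : mem'.i32 (g.R + 0x28) = mem.i32 (g.R + 0x28) := hslot h6 h9
    have ecount : stb_vorbis.floor_count mem' g.f = stb_vorbis.floor_count mem g.f := by
      simp only [vacc, voff]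
      exact he.i32 176 ⟨(152, Mid.hi k), m2, by simp only []; omega, by simp only []; omega⟩
    have ecfg : stb_vorbis.floor_config mem' g.f = stb_vorbis.floor_config mem g.f := by
      simp only [vacc, voff]
      exact he.u64 312 ⟨(152, Mid.hi k), m2, by simp only []; omega, by simp only []; omega⟩
    have hkept := hkc _ hfl.FL2
    refine ⟨by rw [eslot]; exact h1, by rw [eslot]; exact h2, ?_⟩
    intro i hi
    rw [ecount] at hi
    have eat : stb_vorbis.floor_config_at mem' g.f i = stb_vorbis.floor_config_at mem g.f i := by
      simp only [stb_vorbis.floor_config_at]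
      rw [ecfg]
    have hcnt := hfl.FL1
    have ev : Floor1.values mem' (stb_vorbis.floor_config_at mem g.f i) = Floor1.values mem (stb_vorbis.floor_config_at mem g.f i) := by
      simp only [Floor1.values, stb_vorbis.floor_config_at, voff]
      apply hkept.i32
      · simp only [floorBlock, voff]
        omega
      · simp only [floorBlock, voff]
        omega
    rw [eat, ev, eslot]
    exact h3 i hi
  · intro h9
    have hb9 := Mid.hi_ge9 h9
    apply (h.mode h9).transfer
    apply he.sub
    intro w hw
    simp only [ModeOK.wins, List.mem_cons, List.mem_nil_iff, or_false] at hw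
    rcases hw with rfl | rfl
    · exact ⟨(152, Mid.hi k), m2, by simp only []; omega, by simp only []; omega⟩
    · exact ⟨(152, Mid.hi k), m2, by simp only []; omega, by simp only []; omega⟩
  · -- the zero rest
    intro o ho1 ho2
    have hz := h.rest o ho1 ho2
    simp only [voff] at ho2
    rw [he (restFrom z, 1480) m3 o ho1 ho2]
    exact hz


/-- The windows of `*f` that the point reads: those of `Mid g 7 8 8`, of `MapTrans`, and the mapping fields. -/
def readWins : Wins := [(0, 8), (24, 48), (152, 1480), (1749, 1750), (1784, 1788)]

/-- **THE FRAME LEMMA OF THE SEGMENT**: the carrier over a batch of stores `ws` each of which is `Allowed` — a callee's footprint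
(get_bits, error, setup_malloc: then the ghost arena may have grown to `A'`), or the segment's own stores into the mapping record
under construction. The layers that the callee's post re-establishes (the shadow, the arena, `Bits`) and the code span (the
walker's `w_eq`) are given for the new memory. -/
theorem Pt.carry {u₀ : State} {g : Ghost} {i : Nat} {A7 A7c Ai : Arena} {A A' : Arena × List Obj} {m : Nat}
    {mem mem' : Mem} {ws : List Span} (h : Pt u₀ g i A7 A7c Ai A m mem) (hs : Mem.SameExcept ws mem mem')
    (hws : ∀ w, w ∈ ws → Allowed g A.1 m w)
    (hext : A.1.Extends A'.1) (hsub : ∀ o, o ∈ A.2 → o ∈ A'.2) (hoff : ∀ o, o ∈ A'.2 → L.textHi ≤ o.base)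
    (hshadow : ShadowInv A'.2 g.frames' g.R mem')
    (harena : ArenaOK A'.1 A'.2 mem' g.f) (hno : A'.1.temps = [])
    (hbits : Bits (g.Blk A') g.len mem' g.f) : Pt u₀ g i A7 A7c Ai A' m mem' := by
  have G := h.geo
  have ha := h.mid.arena
  have htab := h.table_blk
  have hlt := h.lt
  have hMP1 := h.maps.MP1
  have hm : m = stb_vorbis.mapping mem g.f + 56 * i := by
    rw [← h.recAt]
    simp only [mapAt, stb_vorbis.mapping_at, Off.sizeof.Mapping]
  have htin := arena_inside ha htab
  simp only [Off.sizeof.Mapping] at htin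
  obtain ⟨r1, r2, r3, f1, f2, f3, f4, a1, a2, a3, a4, a5, m1, m2⟩ := G
  -- the windows, as numbers
  have hw' : ∀ w, w ∈ ws →
      (g.RA - 1888 ≤ w.lo ∧ w.hi ≤ g.R + 8) ∨ (g.f + 8 ≤ w.lo ∧ w.hi ≤ g.f + 24) ∨
      (g.f + 48 ≤ w.lo ∧ w.hi ≤ g.f + 152) ∨ (g.f + 1480 ≤ w.lo ∧ w.hi ≤ g.f + 1749) ∨
      (g.f + 1750 ≤ w.lo ∧ w.hi ≤ g.f + 1784) ∨
      (0xC00000 + A.1.B / 8 ≤ w.lo ∧ w.hi ≤ 0xC00000 + (A.1.B + A.1.L + 7) / 8) ∨ (m ≤ w.lo ∧ w.hi ≤ m + 56) := by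
    intro w hw
    have := hws w hw
    simp only [Allowed, shadowSpan] at this
    exact this
  -- the image's text
  have hcode : CodeOK u₀ mem' := by
    apply Mem.EqOn.step_same h.code hs
    intro w hw
    have := hw' w hw
    show 1154368 ≤ w.lo ∨ w.hi ≤ 1048576
    omega
  -- the stack slots of the steady frame
  have eS : Mem.EqOn (g.R + 8) (g.R + 1488) mem mem' := by
    apply hs.eqOn
    intro w hw
    have := hw' w hw
    omega
  have eC : Mem.EqOn (g.R + 8) (g.R + 0x28) mem mem' := by
    apply hs.eqOn
    intro w hw
    have := hw' w hw
    omega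
  -- the global `log2_4`
  have eL : Mem.EqOn 0x120640 0x120650 mem mem' := by
    apply hs.eqOn
    intro w hw
    have := hw' w hw
    omega
  -- the windows of `*f`
  have heq : ObjEq readWins mem g.f mem' g.f := by
    apply ObjEq.of_sameExcept hs
    · intro w hw
      simp only [readWins, List.mem_cons, List.mem_nil_iff, or_false] at hw
      rcases hw with rfl | rfl | rfl | rfl | rfl <;> simp only [] <;> omega
    · intro w hw s hs'
      have := hw' s hs'
      simp only [readWins, List.mem_cons, List.mem_nil_iff, or_false] at hw
      rcases hw with rfl | rfl | rfl | rfl | rfl <;> simp only [] <;> omega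
  have ecount : stb_vorbis.mapping_count mem' g.f = stb_vorbis.mapping_count mem g.f := by
    simp only [vacc, voff]
    exact heq.i32 464 (by decide)
  have etab : stb_vorbis.mapping mem' g.f = stb_vorbis.mapping mem g.f := by
    simp only [vacc, voff]
    exact heq.u64 472 (by decide)
  -- every block of the arena but the mapping table is kept
  have hkept : ∀ C : Block, A.1.Blk C →
      C ≠ ⟨stb_vorbis.mapping mem g.f, Off.sizeof.Mapping * (stb_vorbis.mapping_count mem g.f).toNat⟩ → C.Kept mem mem' := by
    intro C hC hne
    have hd := arena_disjoint ha hC htab hne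
    have hin := arena_inside ha hC
    simp only [vblock, Off.sizeof.Mapping] at hd
    apply Block.Kept.of_sameExcept hs
    · intro w hw
      have := hw' w hw
      omega
    · omega
  -- the records below the counter are kept
  have hrec : ∀ i' : Nat, i' < i → (Block.mk (stb_vorbis.mapping_at mem g.f i') Off.sizeof.Mapping).Kept mem mem' := by
    intro i' hi'
    apply Block.Kept.of_sameExcept hs
    · intro w hw
      have := hw' w hw
      simp only [stb_vorbis.mapping_at, Off.sizeof.Mapping]
      omega
    · simp only [stb_vorbis.mapping_at, Off.sizeof.Mapping]
      omega
  -- the hand-over carrier, the environment of the new arena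
  have hhand : g.Hand A' := HandOK.mono h.hand hext hsub
  have hsubL : ∀ o, o ∈ stackObjs g.frames' ++ A.2 → o ∈ stackObjs g.frames' ++ A'.2 := by
    intro o ho
    rcases List.mem_append.mp ho with h1 | h2
    · exact List.mem_append_left _ h1
    · exact List.mem_append_right _ (hsub o h2)
  have henv : Env (g.Blk A') (g.Live A') mem' := by
    refine ⟨hshadow.covers, ?_, ?_⟩
    · apply harena.runBlk_ok
      · exact ⟨fun B hB => h.mid.env.ok.inside B (Or.inr hB), fun B C hB hC => h.mid.env.ok.apart B C (Or.inr hB) (Or.inr hC)⟩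
      · intro C hC
        rcases List.mem_cons.mp hC with rfl | hmem
        · exact hhand.objOut
        · exact hhand.outside C hmem
    · apply harena.runBlk_live (objs := stackObjs g.frames' ++ A'.2)
      · intro o ho
        exact List.mem_append_right _ ho
      · have hold : BlkLive (listBlk (objBlock g.f :: fixedBlocks g.len)) (g.Live A) := by
          intro B hB
          exact h.mid.env.live B (Or.inr hB)
        refine BlkLive.mono hold ?_
        intro x hx
        obtain ⟨o, ho, hb⟩ := hx
        exact ⟨o, hsubL o ho, hb⟩
  have hmid : Mid g 7 8 8 A7 A' mem' := by
    apply mid_carry h.mid (heq.sub (by decide)) ?_ (h.mid.consts.frame eC (by omega)) ?_ hext henv harena hno hbits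
    · intro B hB
      apply hkept B (hB.mono h.mid.extc)
      exact Since.ne_old hB h.maps.MP1_block
    · intro _ _
      exact eS.i32 (g.R + 0x28) (by omega) (by omega) (by omega)
  have hmaps : MapTrans A7 A7c Ai A'.1 mem' g.f i := by
    refine ⟨h.maps.ext7, h.maps.ext7c, h.maps.exti.trans hext, ?_, ?_, ?_, ?_⟩
    · rw [ecount]
      exact h.maps.n_le
    · rw [ecount]
      exact h.maps.MP1
    · rw [ecount, etab]
      exact h.maps.MP1_block
    · intro i' hi'
      have e : stb_vorbis.mapping_at mem' g.f i' = stb_vorbis.mapping_at mem g.f i' := by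
        simp only [stb_vorbis.mapping_at]
        rw [etab]
      rw [e]
      have hr := h.maps.record i' hi'
      refine hr.frame (heq.sub (by decide)) (hrec i' hi') ?_ hr.MP2
      apply hkept _ (hr.MP2.1.mono h.maps.exti)
      exact (Since.ne_old h.maps.MP1_block.1 hr.MP2).symm
  exact
    { entry := h.entry
      shadowIdx := by
        rw [eS.u64 (g.R + 8) (by omega) (by omega) (by omega)]
        exact h.shadowIdx
      saved_rbx := by
        rw [eS.u64 (g.R + 0x598) (by omega) (by omega) (by omega)]
        exact h.saved_rbx
      saved_rbp := by
        rw [eS.u64 (g.R + 0x5a0) (by omega) (by omega) (by omega)]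
        exact h.saved_rbp
      saved_r12 := by
        rw [eS.u64 (g.R + 0x5a8) (by omega) (by omega) (by omega)]
        exact h.saved_r12
      saved_r13 := by
        rw [eS.u64 (g.R + 0x5b0) (by omega) (by omega) (by omega)]
        exact h.saved_r13
      saved_r14 := by
        rw [eS.u64 (g.R + 0x5b8) (by omega) (by omega) (by omega)]
        exact h.saved_r14
      saved_r15 := by
        rw [eS.u64 (g.R + 0x5c0) (by omega) (by omega) (by omega)]
        exact h.saved_r15
      saved_ra := by
        rw [eS.u64 (g.R + 0x5c8) (by omega) (by omega) (by omega)]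
        exact h.saved_ra
      code := hcode
      shadow := hshadow
      offText := hoff
      ext := h.ext.trans hext
      callers := h.callers
      sh7 := by
        intro j hj
        have e : UInt64.ofNat (Vorbis.Globals.log2_4.beg + j) = addr (0x120640 + j) := rfl
        rw [e, eL.readLE (addr (0x120640 + j)) 1 (by rw [toNat_addr _ (by omega)]; omega)
          (by rw [toNat_addr _ (by omega)]; omega) (by rw [toNat_addr _ (by omega)]; omega), ← e]
        exact h.sh7 j hj
      same := by
        apply h.same.step_same hs
        intro w hw a h1 h2
        have hB := h.ext.B
        have hL := h.ext.L
        have hcase := hw' w hw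
        have ef : (g.e.reg Reg.rdi).toNat = g.f := rfl
        simp only [footprint, writes, depth, ef, Block.span, objBlock, Off.sizeof.stb_vorbis, shadowSpan]
        rw [← hB, ← hL]
        rcases hcase with c | c | c | c | c | c | c
        · exact ⟨_, List.mem_cons_self, by simp only []; omega, by simp only []; omega⟩
        · exact ⟨_, List.mem_cons_of_mem _ List.mem_cons_self, by simp only []; omega, by simp only []; omega⟩
        · exact ⟨_, List.mem_cons_of_mem _ List.mem_cons_self, by simp only []; omega, by simp only []; omega⟩
        · exact ⟨_, List.mem_cons_of_mem _ List.mem_cons_self, by simp only []; omega, by simp only []; omega⟩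
        · exact ⟨_, List.mem_cons_of_mem _ List.mem_cons_self, by simp only []; omega, by simp only []; omega⟩
        · exact ⟨_, List.mem_cons_of_mem _ (List.mem_cons_of_mem _ (List.mem_cons_of_mem _ (List.mem_cons_of_mem _
            List.mem_cons_self))), by simp only []; omega, by simp only []; omega⟩
        · exact ⟨_, List.mem_cons_of_mem _ (List.mem_cons_of_mem _ (List.mem_cons_of_mem _ List.mem_cons_self)),
            by simp only []; omega, by simp only []; omega⟩
      hand := hhand
      mid := hmid
      cnt := by
        unfold StartDecoder.slot
        rw [eS.u32 (g.R + 0x10) (by omega) (by omega) (by omega)]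
        exact h.cnt
      lt := by
        rw [ecount]
        exact h.lt
      maps := hmaps
      recAt := by
        rw [← h.recAt]
        simp only [mapAt, stb_vorbis.mapping_at]
        rw [etab] }


/-- **The carrier over the segment's own stores**: pushes of return addresses (the stack below the steady frame) and stores
into the mapping record under construction. Nothing of `*f`, no shadow byte. -/
theorem Pt.carry_own {u₀ : State} {g : Ghost} {i : Nat} {A7 A7c Ai : Arena} {A : Arena × List Obj} {m : Nat}
    {mem mem' : Mem} {ws : List Span} (h : Pt u₀ g i A7 A7c Ai A m mem) (hs : Mem.SameExcept ws mem mem')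
    (hws : ∀ w, w ∈ ws → (g.RA - 1888 ≤ w.lo ∧ w.hi ≤ g.R + 8) ∨ (m ≤ w.lo ∧ w.hi ≤ m + 56))
    : Pt u₀ g i A7 A7c Ai A m mem' := by
  obtain ⟨r1, r2, r3, f1, f2, f3, f4, a1, a2, a3, a4, a5, m1, m2⟩ := h.geo
  have hun : ShadowUntouched mem mem' := by
    apply hs.eqOn
    intro w hw
    have := hws w hw
    omega
  have harena : ArenaOK A.1 A.2 mem' g.f := by
    apply h.mid.arena.frame
    · simp only [voff]
      omega
    · simp only [voff]
      apply hs.eqOn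
      intro w hw
      have := hws w hw
      omega
  have hbits : Bits (g.Blk A) g.len mem' g.f := by
    apply h.mid.bits.frame_fields
    apply Bits.SameFields.of_sameExcept hs
    all_goals
      intro w hw
      have := hws w hw
      omega
  apply h.carry hs ?_ (Arena.Extends.refl _) (fun _ ho => ho) h.offText (h.shadow.untouched hun) harena h.mid.noTemps hbits
  intro w hw
  unfold Allowed
  rcases hws w hw with c | c
  · exact Or.inl c
  · exact Or.inr (Or.inr (Or.inr (Or.inr (Or.inr (Or.inr c)))))

/-- **The carrier over a callee that writes its stack and windows of `*f` other than the arena's four fields** (get_bits,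
error): the shadow is untouched and `Bits` holds again (the callee's post). -/
theorem Pt.carry_f {u₀ : State} {g : Ghost} {i : Nat} {A7 A7c Ai : Arena} {A : Arena × List Obj} {m : Nat}
    {mem mem' : Mem} {ws : List Span} (h : Pt u₀ g i A7 A7c Ai A m mem) (hs : Mem.SameExcept ws mem mem')
    (hws : ∀ w, w ∈ ws → (g.RA - 1888 ≤ w.lo ∧ w.hi ≤ g.R + 8) ∨ (g.f + 48 ≤ w.lo ∧ w.hi ≤ g.f + 112) ∨
      (g.f + 136 ≤ w.lo ∧ w.hi ≤ g.f + 152) ∨ (g.f + 1480 ≤ w.lo ∧ w.hi ≤ g.f + 1749) ∨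
      (g.f + 1750 ≤ w.lo ∧ w.hi ≤ g.f + 1784))
    (hun : ShadowUntouched mem mem') (hbits : Bits (g.Blk A) g.len mem' g.f) :
    Pt u₀ g i A7 A7c Ai A m mem' := by
  obtain ⟨r1, r2, r3, f1, f2, f3, f4, a1, a2, a3, a4, a5, m1, m2⟩ := h.geo
  have harena : ArenaOK A.1 A.2 mem' g.f := by
    apply h.mid.arena.frame
    · simp only [voff]
      omega
    · simp only [voff]
      apply hs.eqOn
      intro w hw
      have := hws w hw
      omega
  apply h.carry hs ?_ (Arena.Extends.refl _) (fun _ ho => ho) h.offText (h.shadow.untouched hun) harena h.mid.noTemps hbits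
  intro w hw
  unfold Allowed
  rcases hws w hw with c | c | c | c | c
  · exact Or.inl c
  · exact Or.inr (Or.inr (Or.inl ⟨c.1, by omega⟩))
  · exact Or.inr (Or.inr (Or.inl ⟨by omega, c.2⟩))
  · exact Or.inr (Or.inr (Or.inr (Or.inl c)))
  · exact Or.inr (Or.inr (Or.inr (Or.inr (Or.inl c))))

/-- The shadow clause of a callee's precondition at the state right after a `call` (`rsp = R − 8`). -/
theorem Pt.shadowPre {u₀ : State} {g : Ghost} {i : Nat} {A7 A7c Ai : Arena} {A : Arena × List Obj} {m : Nat} {s : State}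
    (h : Pt u₀ g i A7 A7c Ai A m s.mem) (hrsp : (s.reg .rsp).toNat + 8 = g.R) : ShadowPre A.2 g.frames' s := by
  refine ⟨?_, h.offText⟩
  rw [hrsp]
  exact h.shadow

/-- `*f` is inside one live object of the function's live list. -/
theorem Pt.objLive {u₀ : State} {g : Ghost} {i : Nat} {A7 A7c Ai : Arena} {A : Arena × List Obj} {m : Nat} {mem : Mem}
    (h : Pt u₀ g i A7 A7c Ai A m mem) : LiveIn A.2 g.frames' g.f Off.sizeof.stb_vorbis :=
  h.hand.obj.mono (frames'_sub g A.2)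

/-- **`ReaderPre` of `get_bits(f, n)`** at a call of the segment. -/
theorem Pt.readerPre {u₀ : State} {g : Ghost} {i : Nat} {A7 A7c Ai : Arena} {A : Arena × List Obj} {m : Nat} {s : State}
    (h : Pt u₀ g i A7 A7c Ai A m s.mem) (hrsp : (s.reg .rsp).toNat + 8 = g.R) (hrdi : (s.reg .rdi).toNat = g.f) :
    ReaderPre A.2 g.frames' (g.Blk A) g.len s := by
  refine ⟨h.shadowPre hrsp, ?_, ?_⟩
  · rw [hrdi]
    exact readerEnv_mid h.hand h.mid
  · rw [hrdi]
    exact h.mid.bits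

/-- **The precondition of `error(f, e)`** at a call of the segment. -/
theorem Pt.errorPre {u₀ : State} {g : Ghost} {i : Nat} {A7 A7c Ai : Arena} {A : Arena × List Obj} {m : Nat} {s : State}
    (h : Pt u₀ g i A7 A7c Ai A m s.mem) (hrsp : (s.reg .rsp).toNat + 8 = g.R) (hrdi : (s.reg .rdi).toNat = g.f) :
    (error.spec A.2 g.frames').pre s := by
  refine ⟨h.shadowPre hrsp, ?_⟩
  rw [hrdi]
  exact h.objLive

/-- **`ArenaPre` of `setup_malloc(f, sz)`** at the call of the segment. -/
theorem Pt.arenaPre {u₀ : State} {g : Ghost} {i : Nat} {A7 A7c Ai : Arena} {A : Arena × List Obj} {m : Nat} {s : State}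
    (h : Pt u₀ g i A7 A7c Ai A m s.mem) (hrsp : (s.reg .rsp).toNat + 8 = g.R) (hrdi : (s.reg .rdi).toNat = g.f) :
    ArenaPre A.1 A.2 g.frames' s := by
  refine ⟨h.shadowPre hrsp, ?_, ?_, h.hand.arenaText⟩
  · rw [hrdi]
    exact h.objLive.blockLive
  · rw [hrdi]
    exact h.mid.arena

/-- **An error exit of the segment**: SD.ERR (H2, H3 from the finished residue group, H5 from MAPS(i)). -/
theorem Pt.failed {u₀ : State} {g : Ghost} {i : Nat} {A7 A7c Ai : Arena} {A : Arena × List Obj} {m : Nat} {mem : Mem}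
    (h : Pt u₀ g i A7 A7c Ai A m mem) : Failed g.len g.f (g.Live A) A mem := by
  have h5 : H5 (g.Blk A) mem g.f :=
    H5.mono (MappingDeinitOK.h5 h.maps.upTo.deinit h.maps.MP1.2) (fun _ hB => runBlk_setup hB)
  exact h.mid.failed (by omega) (h.mid.h2_done (by omega)) (h.mid.h3_done (by omega)) h5


/-- Under the footprint of a callee that writes its stack and `*f` only (the hypotheses of `Pt.carry_f`), the mapping record
under construction is kept and the channel count reads the same. -/
theorem Pt.kept_f {u₀ : State} {g : Ghost} {i : Nat} {A7 A7c Ai : Arena} {A : Arena × List Obj} {m : Nat}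
    {mem mem' : Mem} {ws : List Span} (h : Pt u₀ g i A7 A7c Ai A m mem) (hs : Mem.SameExcept ws mem mem')
    (hws : ∀ w, w ∈ ws → (g.RA - 1888 ≤ w.lo ∧ w.hi ≤ g.R + 8) ∨ (g.f + 48 ≤ w.lo ∧ w.hi ≤ g.f + 112) ∨
      (g.f + 136 ≤ w.lo ∧ w.hi ≤ g.f + 152) ∨ (g.f + 1480 ≤ w.lo ∧ w.hi ≤ g.f + 1749) ∨
      (g.f + 1750 ≤ w.lo ∧ w.hi ≤ g.f + 1784)) :
    (Block.mk m 56).Kept mem mem' ∧ nchan mem' g.f = nchan mem g.f := by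
  obtain ⟨r1, r2, r3, f1, f2, f3, f4, a1, a2, a3, a4, a5, m1, m2⟩ := h.geo
  constructor
  · apply Block.Kept.of_sameExcept hs
    · intro w hw
      have := hws w hw
      simp only []
      omega
    · simp only []
      omega
  · have e : Mem.EqOn (g.f + 4) (g.f + 8) mem mem' := by
      apply hs.eqOn
      intro w hw
      have := hws w hw
      omega
    simp only [nchan_def, vacc, voff]
    rw [e.i32 (g.f + 4) (by omega) (by omega) (by omega)]

/-- **The assertion at a call return inside the segment** (`stage`: 1 after `get_bits(16)`, 2 after `setup_malloc`, 3 after the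
first `get_bits(1)`, 4 after `get_bits(4)`, 5 after the second `get_bits(1)`, 6 after `get_bits(8)`): the carrier, the
registers (`rbp = f`, `rbx = m`), what the record under construction has so far, what the callee returned. -/
structure St (u₀ : State) (g : Ghost) (i : Nat) (A7 A7c Ai : Arena) (A : Arena × List Obj) (m : Nat) (pc : Word) (stage : Nat)
    (v : State) : Prop where
  pt : Pt u₀ g i A7 A7c Ai A m v.mem
  rip : v.rip = pc
  rsp : v.reg .rsp = addr g.R
  inv : abiInv v
  rbp : v.reg .rbp = addr g.f
  rbx : v.reg .rbx = addr m
  /-- before the allocation the head-of-iteration snapshot is the current arena -/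
  ai : stage ≤ 1 → Ai = A.1
  /-- after `setup_malloc`: NULL, or the block allocated since the head of the iteration -/
  alloc : stage = 2 → v.reg .rax = 0 ∨
    ((v.reg .rax).toNat ≠ 0 ∧ Since Ai A.1 ⟨(v.reg .rax).toNat, Off.sizeof.MappingChannel * nchan v.mem g.f⟩)
  /-- MP2 -/
  mp2 : 3 ≤ stage → Since Ai A.1 ⟨Mapping.chan v.mem m, Off.sizeof.MappingChannel * nchan v.mem g.f⟩
  /-- MP3 -/
  mp3 : 5 ≤ stage → 1 ≤ Mapping.submaps v.mem m ∧ Mapping.submaps v.mem m ≤ 16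
  /-- the result of `get_bits(f, 4)` -/
  small4 : stage = 4 → (v.reg .rax).toNat % 2 ^ 32 < 16
  /-- the result of `get_bits(f, 8)` -/
  small8 : stage = 6 → (v.reg .rax).toNat % 2 ^ 32 < 256

/-- `AtS u₀ g i pc stage v`: `St` for some ghost arenas and record address. -/
def AtS (u₀ : State) (g : Ghost) (i : Nat) (pc : Word) (stage : Nat) (v : State) : Prop :=
  ∃ A7 A7c Ai A m, St u₀ g i A7 A7c Ai A m pc stage v

/-- **The carrier after a successful `setup_malloc(f, n)`**: the ghost arena grew by the new block, one more live object. `hs` is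
the walker's `w_same` after `v_after_call` (`sp` = the callee's entry rsp). -/
theorem Pt.after_malloc {u₀ : State} {g : Ghost} {i : Nat} {A7 A7c Ai : Arena} {A : Arena × List Obj} {m : Nat}
    {mem mem' : Mem} {sp : Nat} (n : Nat) (h : Pt u₀ g i A7 A7c Ai A m mem)
    (h1 : g.RA - 1888 ≤ sp - 80) (h2 : sp ≤ g.R + 8)
    (hs : Mem.SameExcept [⟨sp - 80, sp⟩, ⟨g.f + 8, g.f + 12⟩, ⟨g.f + 128, g.f + 132⟩,
      shadowSpan (A.1.B + A.1.S + 32) (A.1.B + A.1.S + 32 + n)] mem mem')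
    (hfit : A.1.Fits n)
    (harena : ArenaOK (A.1.pushSetup n) (A.1.newSetupObj n :: A.2) mem' g.f)
    (hshadow : ShadowInv (A.1.newSetupObj n :: A.2) g.frames' g.R mem') :
    Pt u₀ g i A7 A7c Ai (A.1.pushSetup n, A.1.newSetupObj n :: A.2) m mem' ∧ nchan mem' g.f = nchan mem g.f := by
  obtain ⟨r1, r2, r3, f1, f2, f3, f4, a1, a2, a3, a4, a5, m1, m2⟩ := h.geo
  have hb := h.mid.arena.bounds
  have hl := le_r8 n
  have hfit' : A.1.S + 32 + r8 n ≤ A.1.T := hfit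
  have hws : ∀ w, w ∈ [(⟨sp - 80, sp⟩ : Span), ⟨g.f + 8, g.f + 12⟩, ⟨g.f + 128, g.f + 132⟩,
      shadowSpan (A.1.B + A.1.S + 32) (A.1.B + A.1.S + 32 + n)] →
      (g.RA - 1888 ≤ w.lo ∧ w.hi ≤ g.R + 8) ∨ (g.f + 8 ≤ w.lo ∧ w.hi ≤ g.f + 12) ∨
      (g.f + 128 ≤ w.lo ∧ w.hi ≤ g.f + 132) ∨
      (0xC00000 + A.1.B / 8 ≤ w.lo ∧ w.hi ≤ 0xC00000 + (A.1.B + A.1.L + 7) / 8) := by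
    intro w hw
    simp only [List.mem_cons, List.mem_nil_iff, or_false] at hw
    rcases hw with rfl | rfl | rfl | rfl <;> simp only [shadowSpan] <;> omega
  have hbits0 : Bits (g.Blk A) g.len mem' g.f := by
    apply h.mid.bits.frame_fields
    apply Bits.SameFields.of_sameExcept hs
    all_goals
      intro w hw
      have := hws w hw
      omega
  have hbits : Bits (g.Blk (A.1.pushSetup n, A.1.newSetupObj n :: A.2)) g.len mem' g.f := by
    apply hbits0.reblk
    · exact runBlk_extra List.mem_cons_self
    · exact runBlk_extra (List.mem_cons_of_mem _ List.mem_cons_self)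
  constructor
  · apply h.carry hs ?_ (A.1.extends_pushSetup n) (fun _ ho => List.mem_cons_of_mem _ ho) ?_ hshadow harena ?_ hbits
    · intro w hw
      unfold Allowed
      simp only [shadowSpan]
      rcases hws w hw with c | c | c | c
      · exact Or.inl c
      · exact Or.inr (Or.inl ⟨c.1, by omega⟩)
      · exact Or.inr (Or.inr (Or.inl ⟨by omega, by omega⟩))
      · exact Or.inr (Or.inr (Or.inr (Or.inr (Or.inr (Or.inl c)))))
    · intro o ho
      rcases List.mem_cons.mp ho with rfl | hold
      · have e : L.textHi = 0x119d40 := rfl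
        simp only [Arena.newSetupObj, Arena.setupObj]
        omega
      · exact h.offText o hold
    · exact h.mid.noTemps
  · have e : Mem.EqOn (g.f + 4) (g.f + 8) mem mem' := by
      apply hs.eqOn
      intro w hw
      have := hws w hw
      omega
    simp only [nchan_def, vacc, voff]
    rw [e.i32 (g.f + 4) (by omega) (by omega) (by omega)]

/-- **The carrier after `get_bits(f, n)` returned** (`sp` = the callee's entry rsp, `R − 8`): the carrier again, the mapping
record kept, the channel count the same. `hs` is the walker's `w_same` after `v_after_call`. -/
theorem Pt.after_get_bits {u₀ : State} {g : Ghost} {i : Nat} {A7 A7c Ai : Arena} {A : Arena × List Obj} {m : Nat}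
    {mem mem' : Mem} (h : Pt u₀ g i A7 A7c Ai A m mem) {sp : Nat} (h1 : g.RA - 1888 ≤ sp - 352) (h2 : sp ≤ g.R + 8)
    (hs : Mem.SameExcept [⟨sp - 352, sp⟩, ⟨g.f + 48, g.f + 56⟩, ⟨g.f + 84, g.f + 96⟩, ⟨g.f + 136, g.f + 144⟩,
      ⟨g.f + 1484, g.f + 1749⟩, ⟨g.f + 1752, g.f + 1784⟩] mem mem')
    (hun : ShadowUntouched mem mem') (hbits : Bits (g.Blk A) g.len mem' g.f) :
    Pt u₀ g i A7 A7c Ai A m mem' ∧ (Block.mk m 56).Kept mem mem' ∧ nchan mem' g.f = nchan mem g.f := by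
  have hws : ∀ w, w ∈ [(⟨sp - 352, sp⟩ : Span), ⟨g.f + 48, g.f + 56⟩, ⟨g.f + 84, g.f + 96⟩, ⟨g.f + 136, g.f + 144⟩,
      ⟨g.f + 1484, g.f + 1749⟩, ⟨g.f + 1752, g.f + 1784⟩] →
      (g.RA - 1888 ≤ w.lo ∧ w.hi ≤ g.R + 8) ∨ (g.f + 48 ≤ w.lo ∧ w.hi ≤ g.f + 112) ∨
      (g.f + 136 ≤ w.lo ∧ w.hi ≤ g.f + 152) ∨ (g.f + 1480 ≤ w.lo ∧ w.hi ≤ g.f + 1749) ∨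
      (g.f + 1750 ≤ w.lo ∧ w.hi ≤ g.f + 1784) := by
    intro w hw
    simp only [List.mem_cons, List.mem_nil_iff, or_false] at hw
    rcases hw with rfl | rfl | rfl | rfl | rfl | rfl <;> simp only [] <;> omega
  exact ⟨h.carry_f hs hws hun hbits, h.kept_f hs hws⟩

/-- **The carrier after `error(f, e)` returned** (`sp` = the callee's entry rsp): `error` stores `f->error` only. -/
theorem Pt.after_error {u₀ : State} {g : Ghost} {i : Nat} {A7 A7c Ai : Arena} {A : Arena × List Obj} {m : Nat}
    {mem mem' : Mem} (h : Pt u₀ g i A7 A7c Ai A m mem) {sp : Nat} (h1 : g.RA - 1888 ≤ sp - 48) (h2 : sp ≤ g.R + 8)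
    (hs : Mem.SameExcept [⟨sp - 48, sp⟩, ⟨g.f + 140, g.f + 140 + 4⟩] mem mem')
    (hun : ShadowUntouched mem mem') : Pt u₀ g i A7 A7c Ai A m mem' := by
  have hws : ∀ w, w ∈ [(⟨sp - 48, sp⟩ : Span), ⟨g.f + 140, g.f + 140 + 4⟩] →
      (g.RA - 1888 ≤ w.lo ∧ w.hi ≤ g.R + 8) ∨ (g.f + 48 ≤ w.lo ∧ w.hi ≤ g.f + 112) ∨
      (g.f + 136 ≤ w.lo ∧ w.hi ≤ g.f + 152) ∨ (g.f + 1480 ≤ w.lo ∧ w.hi ≤ g.f + 1749) ∨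
      (g.f + 1750 ≤ w.lo ∧ w.hi ≤ g.f + 1784) := by
    intro w hw
    simp only [List.mem_cons, List.mem_nil_iff, or_false] at hw
    rcases hw with rfl | rfl <;> simp only [] <;> omega
  obtain ⟨r1, r2, r3, f1, f2, f3, f4, a1, a2, a3, a4, a5, m1, m2⟩ := h.geo
  have hbits : Bits (g.Blk A) g.len mem' g.f := by
    apply h.mid.bits.frame_fields
    apply Bits.SameFields.of_sameExcept hs
    all_goals
      intro w hw
      simp only [List.mem_cons, List.mem_nil_iff, or_false] at hw
      rcases hw with rfl | rfl <;> simp only [] <;> omega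
  exact h.carry_f hs hws hun hbits

/-- **The exit assertion `AtERR` after `error` returned 0**: the carrier gives SD.ERR. -/
theorem St.toERR {u₀ : State} {g : Ghost} {i : Nat} {A7 A7c Ai : Arena} {A : Arena × List Obj} {m : Nat} {v : State}
    (h : Pt u₀ g i A7 A7c Ai A m v.mem) (hrip : v.rip = pc_ERR) (hrsp : v.reg .rsp = addr g.R) (hinv : abiInv v)
    (hrax : v.reg .rax = 0) : AtERR u₀ g v := by
  refine ⟨A, h.frame pc_ERR hrip hrsp hinv, h.hand, Or.inl ⟨?_, h.failed⟩⟩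
  rw [hrax]
  rfl


/-- **A check site inside the mapping record under construction**: the `n` bytes at offset `off` of the 56-byte record. -/
theorem Pt.site_rec {u₀ : State} {g : Ghost} {i : Nat} {A7 A7c Ai : Arena} {A : Arena × List Obj} {m : Nat} {mem : Mem}
    (h : Pt u₀ g i A7 A7c Ai A m mem) (off n : Nat) (hoff : off + n ≤ 56) (hn : 1 ≤ n) : Site (g.Live A) (m + off) n := by
  have hL : BlkLive A.1.Blk (g.Live A) := h.mid.env.live.sub (fun _ hB => runBlk_setup hB)
  apply h.maps.upTo.site_record hL h.lt off n (by simp only [Off.sizeof.Mapping]; omega) hn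
  rw [← h.recAt]
  rfl

/-- **The carrier after a failed `setup_malloc(f, n)`** (it returned NULL): the arena and the shadow are as they were. The
window of the footprint in the shadow need not lie inside the arena's shadow when the block does not fit; the shadow is
untouched, so it is dropped first. -/
theorem Pt.after_malloc_fail {u₀ : State} {g : Ghost} {i : Nat} {A7 A7c Ai : Arena} {A : Arena × List Obj} {m : Nat}
    {mem mem' : Mem} {sp : Nat} (n : Nat) (hn : n ≤ 48) (h : Pt u₀ g i A7 A7c Ai A m mem)
    (h1 : g.RA - 1888 ≤ sp - 80) (h2 : sp ≤ g.R + 8)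
    (hs : Mem.SameExcept [⟨sp - 80, sp⟩, ⟨g.f + 8, g.f + 12⟩, ⟨g.f + 128, g.f + 132⟩,
      shadowSpan (A.1.B + A.1.S + 32) (A.1.B + A.1.S + 32 + n)] mem mem')
    (harena : ArenaOK A.1 A.2 mem' g.f) (hun : ShadowUntouched mem mem') :
    Pt u₀ g i A7 A7c Ai A m mem' ∧ nchan mem' g.f = nchan mem g.f := by
  obtain ⟨r1, r2, r3, f1, f2, f3, f4, a1, a2, a3, a4, a5, m1, m2⟩ := h.geo
  have hb := h.mid.arena.bounds
  have hs' : Mem.SameExcept [⟨sp - 80, sp⟩, ⟨g.f + 8, g.f + 12⟩, ⟨g.f + 128, g.f + 132⟩] mem mem' := by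
    intro a ha
    by_cases hsh : 0xC00000 ≤ a.toNat ∧ a.toNat < 0xE00000
    · exact hun a hsh.1 hsh.2
    · apply hs a
      intro w hw
      simp only [List.mem_cons, List.mem_nil_iff, or_false] at hw
      rcases hw with rfl | rfl | rfl | rfl
      · exact ha _ List.mem_cons_self
      · exact ha _ (List.mem_cons_of_mem _ List.mem_cons_self)
      · exact ha _ (List.mem_cons_of_mem _ (List.mem_cons_of_mem _ List.mem_cons_self))
      · simp only [shadowSpan]
        omega
  have hws : ∀ w, w ∈ [(⟨sp - 80, sp⟩ : Span), ⟨g.f + 8, g.f + 12⟩, ⟨g.f + 128, g.f + 132⟩] →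
      (g.RA - 1888 ≤ w.lo ∧ w.hi ≤ g.R + 8) ∨ (g.f + 8 ≤ w.lo ∧ w.hi ≤ g.f + 12) ∨
      (g.f + 128 ≤ w.lo ∧ w.hi ≤ g.f + 132) := by
    intro w hw
    simp only [List.mem_cons, List.mem_nil_iff, or_false] at hw
    rcases hw with rfl | rfl | rfl <;> simp only [] <;> omega
  have hbits : Bits (g.Blk A) g.len mem' g.f := by
    apply h.mid.bits.frame_fields
    apply Bits.SameFields.of_sameExcept hs'
    all_goals
      intro w hw
      have := hws w hw
      omega
  constructor
  · apply h.carry hs' ?_ (Arena.Extends.refl _) (fun _ ho => ho) h.offText (h.shadow.untouched hun) harena h.mid.noTemps hbits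
    intro w hw
    unfold Allowed
    rcases hws w hw with c | c | c
    · exact Or.inl c
    · exact Or.inr (Or.inl ⟨c.1, by omega⟩)
    · exact Or.inr (Or.inr (Or.inl ⟨by omega, by omega⟩))
  · have e : Mem.EqOn (g.f + 4) (g.f + 8) mem mem' := by
      apply hs'.eqOn
      intro w hw
      have := hws w hw
      omega
    simp only [nchan_def, vacc, voff]
    rw [e.i32 (g.f + 4) (by omega) (by omega) (by omega)]


/-- **The carrier over ONE store of the segment**: a push below the steady frame, or a store into the mapping record under
construction. The walker's memory nests are taken store by store with it. -/
theorem Pt.write {u₀ : State} {g : Ghost} {i : Nat} {A7 A7c Ai : Arena} {A : Arena × List Obj} {m : Nat} {mem : Mem}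
    (h : Pt u₀ g i A7 A7c Ai A m mem) (a : Word) (n x : Nat)
    (hc : (g.RA - 1888 ≤ a.toNat ∧ a.toNat + n ≤ g.R + 8) ∨ (m ≤ a.toNat ∧ a.toNat + n ≤ m + 56)) :
    Pt u₀ g i A7 A7c Ai A m (mem.writeLE a n x) := by
  obtain ⟨r1, r2, r3, f1, f2, f3, f4, a1, a2, a3, a4, a5, m1, m2⟩ := h.geo
  have hs : Mem.SameExcept [⟨a.toNat, a.toNat + n⟩] mem (mem.writeLE a n x) := by
    apply Mem.SameExcept.writeLE
    · omega
    · exact ⟨_, List.mem_cons_self, Nat.le_refl _, Nat.le_refl _⟩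
  apply h.carry_own hs
  intro w hw
  have e : w = ⟨a.toNat, a.toNat + n⟩ := List.mem_singleton.mp hw
  subst e
  simp only []
  omega


/-- One store of the segment (as in `Pt.write`) leaves the channel count alone. -/
theorem nchan_write {g : Ghost} {A : Arena} {m : Nat} (G : Geo g A m) (mem : Mem) (a : Word) (n x : Nat)
    (hc : (g.RA - 1888 ≤ a.toNat ∧ a.toNat + n ≤ g.R + 8) ∨ (m ≤ a.toNat ∧ a.toNat + n ≤ m + 56)) :
    nchan (mem.writeLE a n x) g.f = nchan mem g.f := by
  obtain ⟨r1, r2, r3, f1, f2, f3, f4, a1, a2, a3, a4, a5, m1, m2⟩ := G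
  have hs : Mem.SameExcept [⟨a.toNat, a.toNat + n⟩] mem (mem.writeLE a n x) := by
    apply Mem.SameExcept.writeLE
    · omega
    · exact ⟨_, List.mem_cons_self, Nat.le_refl _, Nat.le_refl _⟩
  have e : Mem.EqOn (g.f + 4) (g.f + 8) mem (mem.writeLE a n x) := by
    apply hs.eqOn
    intro w hw
    have e : w = ⟨a.toNat, a.toNat + n⟩ := List.mem_singleton.mp hw
    subst e
    simp only []
    omega
  simp only [nchan_def, vacc, voff]
  rw [e.i32 (g.f + 4) (by omega) (by omega) (by omega)]


/-- **What the segment reads of the record under construction and of `*f`, unchanged from `mem` to `mem'`**: `chan`, `submaps`,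
`coupling_steps`, the channel count. -/
structure RecEq (g : Ghost) (m : Nat) (mem mem' : Mem) : Prop where
  chan : Mapping.chan mem' m = Mapping.chan mem m
  submaps : Mapping.submaps mem' m = Mapping.submaps mem m
  steps : Mapping.coupling_steps mem' m = Mapping.coupling_steps mem m
  nch : nchan mem' g.f = nchan mem g.f

/-- Nothing changed. -/
theorem RecEq.refl (g : Ghost) (m : Nat) (mem : Mem) : RecEq g m mem mem := ⟨rfl, rfl, rfl, rfl⟩

/-- Two steps. -/
theorem RecEq.trans {g : Ghost} {m : Nat} {mem mem' mem'' : Mem} (h1 : RecEq g m mem mem') (h2 : RecEq g m mem' mem'') :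
    RecEq g m mem mem'' :=
  ⟨h2.chan.trans h1.chan, h2.submaps.trans h1.submaps, h2.steps.trans h1.steps, h2.nch.trans h1.nch⟩

/-- A push below the steady frame keeps the record's fields and the channel count. -/
theorem RecEq.push {g : Ghost} {A : Arena} {m : Nat} (G : Geo g A m) (mem : Mem) (a : Word) (n x : Nat)
    (hc : g.RA - 1888 ≤ a.toNat ∧ a.toNat + n ≤ g.R + 8) : RecEq g m mem (mem.writeLE a n x) := by
  have hn := nchan_write G mem a n x (Or.inl hc)
  obtain ⟨r1, r2, r3, f1, f2, f3, f4, a1, a2, a3, a4, a5, m1, m2⟩ := G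
  refine ⟨?_, ?_, ?_, hn⟩
  · simp only [vacc, voff, Mem.ptr]
    exact Mem.u64_writeLE _ _ _ _ _ (by omega) (by omega) (by omega)
  · simp only [vacc, voff]
    exact Mem.u8_writeLE _ _ _ _ _ (by omega) (by omega) (by omega)
  · simp only [vacc, voff]
    exact Mem.u16_writeLE _ _ _ _ _ (by omega) (by omega) (by omega)

/-- A callee that kept the record and the channel count. -/
theorem RecEq.of_kept {g : Ghost} {m : Nat} {mem mem' : Mem} (hk : (Block.mk m 56).Kept mem mem')
    (hn : Vorbis.nchan mem' g.f = Vorbis.nchan mem g.f) : RecEq g m mem mem' := by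
  refine ⟨?_, ?_, ?_, hn⟩
  · simp only [vacc, voff, Mem.ptr]
    exact hk.u64 (m + 8) (by simp only []; omega) (by simp only []; omega)
  · simp only [vacc, voff]
    exact hk.u8 (m + 16) (by simp only []; omega) (by simp only []; omega)
  · simp only [vacc, voff]
    exact hk.u16 (m + 0) (by simp only []; omega) (by simp only []; omega)

/-- `m->submaps = x` (a byte store at `m + 16`): the other fields are kept, the byte reads back. -/
theorem store_submaps {g : Ghost} {A : Arena} {m : Nat} (G : Geo g A m) (mem : Mem) (mw : Word) (hmn : mw.toNat = m) (x : Nat) :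
    Mapping.chan (mem.writeLE (mw + 16) 1 x) m = Mapping.chan mem m ∧
      Mapping.submaps (mem.writeLE (mw + 16) 1 x) m = x % 2 ^ 8 ∧
      Mapping.coupling_steps (mem.writeLE (mw + 16) 1 x) m = Mapping.coupling_steps mem m ∧
      nchan (mem.writeLE (mw + 16) 1 x) g.f = nchan mem g.f := by
  have hm2 := G.m2
  have ha2 := G.a2
  have e0 : mw = addr m := eq_addr mw m hmn
  have e : mw + 16 = addr (m + 16) := by
    rw [e0]
    simp only [vfield]
  have et : (mw + 16).toNat = m + 16 := by
    rw [e, toNat_addr _ (by omega)]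
  have hn := nchan_write G mem (mw + 16) 1 x (Or.inr (by omega))
  refine ⟨?_, ?_, ?_, hn⟩
  · simp only [vacc, voff, Mem.ptr]
    exact Mem.u64_writeLE _ _ _ _ _ (by omega) (by omega) (by omega)
  · simp only [vacc, voff]
    rw [e]
    exact Mem.u8_writeLE_same _ _ _
  · simp only [vacc, voff]
    exact Mem.u16_writeLE _ _ _ _ _ (by omega) (by omega) (by omega)

/-- `m->coupling_steps = x` (a word store at `m`): the other fields are kept, the word reads back. -/
theorem store_steps {g : Ghost} {A : Arena} {m : Nat} (G : Geo g A m) (mem : Mem) (mw : Word) (hmn : mw.toNat = m) (x : Nat) :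
    Mapping.chan (mem.writeLE mw 2 x) m = Mapping.chan mem m ∧
      Mapping.submaps (mem.writeLE mw 2 x) m = Mapping.submaps mem m ∧
      Mapping.coupling_steps (mem.writeLE mw 2 x) m = x % 2 ^ 16 ∧
      nchan (mem.writeLE mw 2 x) g.f = nchan mem g.f := by
  have hm2 := G.m2
  have ha2 := G.a2
  have e0 : mw = addr m := eq_addr mw m hmn
  have hn := nchan_write G mem mw 2 x (Or.inr (by omega))
  refine ⟨?_, ?_, ?_, hn⟩
  · simp only [vacc, voff, Mem.ptr]
    exact Mem.u64_writeLE _ _ _ _ _ (by omega) (by omega) (by omega)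
  · simp only [vacc, voff]
    exact Mem.u8_writeLE _ _ _ _ _ (by omega) (by omega) (by omega)
  · simp only [vacc, voff]
    rw [e0]
    exact Mem.u16_writeLE_same _ _ _

end Vorbis.Spec.start_decoder_R9
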